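-- pv_equiv track=rewrite | github.com/yunnie05/Introduction-to-Programming | Week 4/ip047.py | whichone
-- ===== SOURCE A (Python) =====
-- def find_el(n):
--     fp= 1
--     fs= 2
--     s= fs
--     if n==1 or n==2:
--         return n
--     while fs < n:
--         s= fs
--         new_line= fp+ fs
--         (fp,fs)=(fs,new_line)
--     return s
--
-- def whichone(n):
--     base= {1: 'A', 2: 'B'}
--     s= find_el(n)
--     if s <= 2 and n<=s:
--         return base[s]
--     if n > s:
--         n= n-s
--     return whichone(n)
-- ===== SOURCE B (Python) =====
-- def whichone(n):
--     if n <= 2: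
--         return 'A' if n == 1 else 'B'
--     fibs = []
--     a, b = 1, 2
--     while a < n:
--         fibs.append(a)
--         a, b = b, a + b
--     while n > 2:
--         for f in reversed(fibs):
--             if f < n:
--                 n -= f
--                 break
--     return 'A' if n == 1 else 'B'
-- ===== Notes on version B (the rewrite author's own statement) =====
-- stated objective: alternative
-- what changed: Replaces the recursion that recomputes the Fibonacci chain via find_el at every step with one precomputed ascending table of Fibonacci numbers below n and a single iterative greedy subtraction loop scanning that table in reverse.
import Mathlib
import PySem

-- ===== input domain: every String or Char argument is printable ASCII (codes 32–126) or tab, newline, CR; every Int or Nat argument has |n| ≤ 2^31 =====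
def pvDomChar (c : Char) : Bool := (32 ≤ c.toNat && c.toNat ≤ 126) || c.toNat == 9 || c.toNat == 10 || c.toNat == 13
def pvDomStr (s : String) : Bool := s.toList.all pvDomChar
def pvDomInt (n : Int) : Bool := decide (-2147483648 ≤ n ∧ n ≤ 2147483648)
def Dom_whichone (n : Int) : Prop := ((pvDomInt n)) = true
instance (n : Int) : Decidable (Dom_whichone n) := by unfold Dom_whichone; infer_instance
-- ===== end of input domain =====

-- B replaces A's recursion (which recomputes the Fibonacci chain with find_el at every step)
-- by one precomputed ascending Fibonacci table and a single iterative greedy subtraction loop.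

-- ===== PORT A =====
-- the while-loop of find_el; fuel n.toNat is sufficient: fs grows by at least 1 per
-- iteration starting from 2, so the loop runs fewer than n times
def findElLoop : Nat → Int → Int → Int → Int → Int
  | 0, _, _, s, _ => s
  | fuel+1, fp, fs, s, n => if fs < n then findElLoop fuel fs (fp+fs) fs n else s

def find_el (n : Int) : Int :=
  if n = 1 ∨ n = 2 then n else findElLoop n.toNat 1 2 2 n

-- termination facts for whichone's recursion (cited in decreasing_by)
theorem findElLoop_ge2 (fuel : Nat) : ∀ (fp fs s n : Int), 0 ≤ fp → 2 ≤ fs → 2 ≤ s →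
    2 ≤ findElLoop fuel fp fs s n := by
  induction fuel with
  | zero => intro fp fs s n _ _ h2; exact h2
  | succ fuel ih =>
    intro fp fs s n h0 h1 h2
    simp only [findElLoop]
    split
    · exact ih fs (fp+fs) fs n (by omega) (by omega) h1
    · exact h2

theorem findElLoop_lt (fuel : Nat) : ∀ (fp fs s n : Int), s < n →
    findElLoop fuel fp fs s n < n := by
  induction fuel with
  | zero => intro _ _ _ _ h; exact h
  | succ fuel ih =>
    intro fp fs s n h
    simp only [findElLoop]
    split
    · exact ih fs (fp+fs) fs n (by omega)
    · exact h

theorem find_el_ge1 (n : Int) : 1 ≤ find_el n := by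
  unfold find_el
  split
  · omega
  · have := findElLoop_ge2 n.toNat 1 2 2 n (by omega) (by omega) (by omega); omega

theorem find_el_lt_self (n : Int) (h : 2 < find_el n) : find_el n < n := by
  by_cases hc : n = 1 ∨ n = 2
  · rw [find_el, if_pos hc] at h; omega
  · rw [find_el, if_neg hc] at h ⊢
    by_cases hn : 3 ≤ n
    · exact findElLoop_lt n.toNat 1 2 2 n (by omega)
    · exfalso
      have hz : n.toNat = 0 := by omega
      rw [hz] at h
      simp only [findElLoop] at h
      omega

def whichone (n : Int) : String :=
  let base : PySem.Dict Int String := (PySem.Dict.empty.insert 1 "A").insert 2 "B"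
  let s := find_el n
  if s ≤ 2 ∧ n ≤ s then (base.get? s).getD ""
  else if n > s then whichone (n - s)
  else whichone n   -- unreachable (Python would recurse forever here); proved absurd in decreasing_by
termination_by n.toNat
decreasing_by
  · have h1 := find_el_ge1 n; omega
  · exfalso
    rename_i hbase hrec
    have h2 : 2 < find_el n := by omega
    have := find_el_lt_self n h2
    omega

-- ===== PORT B =====
-- the first while-loop of Source B: the ascending list of Fibonacci numbers 1,2,3,5,... below n;
-- fuel n.toNat suffices: a grows by at least 1 per iteration starting from 1
def fibsBelow : Nat → Int → Int → Int → List Int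
  | 0, _, _, _ => []
  | fuel+1, a, b, n => if a < n then a :: fibsBelow fuel b (a+b) n else []

-- the second while-loop of Source B; the inner for/break is the first element of the reversed
-- table with f < n (List.find?); fuel n.toNat suffices: n shrinks by at least 1 per iteration
def greedyLoop : Nat → List Int → Int → Int
  | 0, _, n => n
  | fuel+1, fibs, n =>
    if 2 < n then
      match fibs.reverse.find? (fun f => decide (f < n)) with
      | some f => greedyLoop fuel fibs (n - f)
      | none => n   -- unreachable: 1 is in the table and 1 < n (Python would loop forever)
    else n

def whichone_alt (n : Int) : String :=
  if n ≤ 2 then (if n = 1 then "A" else "B")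
  else
    let fibs := fibsBelow n.toNat 1 2 n
    let r := greedyLoop n.toNat fibs n
    if r = 1 then "A" else "B"

-- ===== PRECONDITION & SPEC =====
def Spec_whichone (n : Int) (out : String) : Prop := out = whichone_alt n
instance (n : Int) (out : String) : Decidable (Spec_whichone n out) := by unfold Spec_whichone; infer_instance

-- ===== CLAIM (what is proved, stated in full; the proofs are below) =====
def Claim_equal_whichone : Prop := ∀ (n : Int), Dom_whichone n → Spec_whichone n (whichone n)

-- ===== LEMMAS AND PROOFS =====

theorem fibs_all_ge (fuel : Nat) : ∀ (a b n m : Int), 0 ≤ m → m ≤ a → m ≤ b →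
    ∀ x ∈ fibsBelow fuel a b n, m ≤ x := by
  induction fuel with
  | zero => intro a b n m _ _ _ x hx; simp [fibsBelow] at hx
  | succ fuel ih =>
    intro a b n m h0 ha hb x hx
    simp only [fibsBelow] at hx
    split at hx
    · rcases List.mem_cons.mp hx with rfl | hx
      · exact ha
      · exact ih b (a+b) n m h0 hb (by omega) x hx
    · simp at hx

theorem fibs_all_lt (fuel : Nat) : ∀ (a b m : Int), ∀ x ∈ fibsBelow fuel a b m, x < m := by
  induction fuel with
  | zero => intro a b m x hx; simp [fibsBelow] at hx
  | succ fuel ih =>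
    intro a b m x hx
    simp only [fibsBelow] at hx
    split at hx
    · rcases List.mem_cons.mp hx with rfl | hx
      · omega
      · exact ih b (a+b) m x hx
    · simp at hx

theorem fibs_split (fuel : Nat) : ∀ (a b m n : Int), 0 ≤ m → 0 < a → a < b → m ≤ n →
    ∃ t, fibsBelow fuel a b n = fibsBelow fuel a b m ++ t ∧ ∀ x ∈ t, m ≤ x := by
  induction fuel with
  | zero => intro a b m n _ _ _ _; exact ⟨[], rfl, by simp⟩
  | succ fuel ih =>
    intro a b m n h0 ha hab hmn
    by_cases hm : a < m
    · obtain ⟨t, ht, hge⟩ := ih b (a+b) m n h0 (by omega) (by omega) hmn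
      refine ⟨t, ?_, hge⟩
      simp only [fibsBelow, if_pos hm, if_pos (show a < n by omega), ht, List.cons_append]
    · refine ⟨fibsBelow (fuel+1) a b n, ?_, ?_⟩
      · simp [fibsBelow, hm]
      · exact fibs_all_ge (fuel+1) a b n m h0 (by omega) (by omega)

theorem fibs_fuel (f1 : Nat) : ∀ (f2 : Nat) (a b n : Int), 0 < a → a < b →
    (n - a).toNat ≤ f1 → (n - a).toNat ≤ f2 → fibsBelow f1 a b n = fibsBelow f2 a b n := by
  induction f1 with
  | zero =>
    intro f2 a b n _ _ h1 _
    have hn : ¬ a < n := by omega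
    cases f2 <;> simp [fibsBelow, hn]
  | succ f1 ih =>
    intro f2 a b n ha hab h1 h2
    by_cases hn : a < n
    · have hf2 : (n - a).toNat ≠ 0 := by omega
      obtain ⟨f2', rfl⟩ : ∃ f2', f2 = f2' + 1 := ⟨f2 - 1, by omega⟩
      simp only [fibsBelow, if_pos hn]
      rw [ih f2' b (a+b) n (by omega) (by omega) (by omega) (by omega)]
    · cases f2 <;> simp [fibsBelow, hn]

theorem findElLoop_eq_getLastD (fuel : Nat) : ∀ (fp fs s n : Int),
    findElLoop fuel fp fs s n = (fibsBelow fuel fs (fp+fs) n).getLastD s := by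
  induction fuel with
  | zero => intro _ _ _ _; rfl
  | succ fuel ih =>
    intro fp fs s n
    simp only [findElLoop, fibsBelow]
    split
    · rw [ih fs (fp+fs) fs n, List.getLastD_cons]
    · rfl

theorem find?_reverse_of_all (l : List Int) (p : Int → Bool) (hne : l ≠ [])
    (hall : ∀ x ∈ l, p x = true) : l.reverse.find? p = l.getLast? := by
  obtain ⟨ys, x, rfl⟩ := List.eq_nil_or_concat l |>.resolve_left hne
  have hx : p x = true := hall x (by simp)
  rw [List.concat_eq_append, List.reverse_append]
  simp [hx]

theorem fibsBelow_ne_nil (fuel : Nat) (a b n : Int) (hf : fuel ≠ 0) (h : a < n) :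
    fibsBelow fuel a b n ≠ [] := by
  obtain ⟨f, rfl⟩ : ∃ f, fuel = f + 1 := ⟨fuel - 1, by omega⟩
  simp [fibsBelow, h]

-- key lemma: B's reverse scan of the precomputed table picks exactly find_el m
theorem find?_eq_find_el (n₀ m : Int) (hn : 3 ≤ n₀) (hm3 : 3 ≤ m) (hmn : m ≤ n₀) :
    (fibsBelow n₀.toNat 1 2 n₀).reverse.find? (fun f => decide (f < m)) = some (find_el m) := by
  obtain ⟨t, ht, hge⟩ := fibs_split n₀.toNat 1 2 m n₀ (by omega) (by omega) (by omega) hmn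
  rw [ht, List.reverse_append, List.find?_append]
  have htnone : t.reverse.find? (fun f => decide (f < m)) = none := by
    rw [List.find?_eq_none]
    intro x hx
    have := hge x (List.mem_reverse.mp hx)
    simp; omega
  rw [htnone, Option.none_or]
  -- the prefix: all elements < m, nonempty
  have hPne : fibsBelow n₀.toNat 1 2 m ≠ [] :=
    fibsBelow_ne_nil n₀.toNat 1 2 m (by omega) (by omega)
  rw [find?_reverse_of_all _ _ hPne (by
    intro x hx
    have := fibs_all_lt n₀.toNat 1 2 m x hx
    simp; omega)]
  -- unfold one step of the prefix: it is 1 :: fibsBelow (n₀.toNat - 1) 2 3 m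
  obtain ⟨F, hF⟩ : ∃ F, n₀.toNat = F + 1 := ⟨n₀.toNat - 1, by omega⟩
  have hF2 : F ≠ 0 := by omega
  rw [hF]
  simp only [fibsBelow, if_pos (show (1:Int) < m by omega)]
  rw [show (1:Int) + 2 = 3 from by norm_num]
  have hLne : fibsBelow F 2 3 m ≠ [] := fibsBelow_ne_nil F 2 3 m hF2 (by omega)
  have hgl : (1 :: fibsBelow F 2 3 m).getLast? = some ((fibsBelow F 2 3 m).getLastD 2) := by
    cases hL : fibsBelow F 2 3 m with
    | nil => exact absurd hL hLne
    | cons a l => simp [List.getLast?_cons]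
  rw [hgl]
  congr 1
  -- find_el m via the loop-to-list bridge and fuel irrelevance
  have hm12 : ¬ (m = 1 ∨ m = 2) := by omega
  rw [find_el, if_neg hm12, findElLoop_eq_getLastD]
  rw [show (1:Int) + 2 = 3 from by norm_num]
  rw [fibs_fuel m.toNat F 2 3 m (by omega) (by omega) (by omega) (by omega)]

-- base values: for m ≤ 2, whichone m is 'A' exactly at m = 1
theorem whichone_base (m : Int) (h : m ≤ 2) :
    whichone m = (if m = 1 then "A" else "B") := by
  rw [whichone]
  rcases (show m = 1 ∨ m = 2 ∨ m ≤ 0 by omega) with rfl | rfl | h0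
  · simp [find_el, PySem.Dict.get?]
    decide
  · simp [find_el, PySem.Dict.get?]
    decide
  · have hm12 : ¬ (m = 1 ∨ m = 2) := by omega
    have hz : m.toNat = 0 := by omega
    have hfe : find_el m = 2 := by rw [find_el, if_neg hm12, hz]; rfl
    simp only [hfe]
    rw [if_pos ⟨by omega, by omega⟩, if_neg (by omega)]
    decide

theorem find_el_ge2_of_ge3 (m : Int) (h : 3 ≤ m) : 2 ≤ find_el m := by
  rw [find_el, if_neg (by omega)]
  exact findElLoop_ge2 m.toNat 1 2 2 m (by omega) (by omega) (by omega)

theorem find_el_lt_of_ge3 (m : Int) (h : 3 ≤ m) : find_el m < m := by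
  rw [find_el, if_neg (by omega)]
  exact findElLoop_lt m.toNat 1 2 2 m (by omega)

-- main loop correspondence: A's recursion equals B's greedy loop over the fixed table
theorem main_loop (n₀ : Int) (hn : 3 ≤ n₀) : ∀ (fuel : Nat) (m : Int), m ≤ n₀ → m ≤ 2 + fuel →
    whichone m = (if greedyLoop fuel (fibsBelow n₀.toNat 1 2 n₀) m = 1 then "A" else "B") := by
  intro fuel
  induction fuel with
  | zero =>
    intro m hmn hf
    simp only [greedyLoop]
    exact whichone_base m (by omega)
  | succ fuel ih =>
    intro m hmn hf
    by_cases hm : m ≤ 2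
    · simp only [greedyLoop, if_neg (show ¬ 2 < m by omega)]
      exact whichone_base m hm
    · have hm3 : 3 ≤ m := by omega
      have hs2 := find_el_ge2_of_ge3 m hm3
      have hsm := find_el_lt_of_ge3 m hm3
      have hA : whichone m = whichone (m - find_el m) := by
        have h1 : ¬ (find_el m ≤ 2 ∧ m ≤ find_el m) := by omega
        have h2 : m > find_el m := by omega
        rw [whichone]
        simp only [if_neg h1, if_pos h2]
      have hB : greedyLoop (fuel+1) (fibsBelow n₀.toNat 1 2 n₀) m
          = greedyLoop fuel (fibsBelow n₀.toNat 1 2 n₀) (m - find_el m) := by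
        simp only [greedyLoop, if_pos (show 2 < m by omega)]
        rw [find?_eq_find_el n₀ m hn hm3 hmn]
      rw [hA, hB]
      exact ih (m - find_el m) (by omega) (by omega)

-- ===== VERDICT (by name: the statement is the Claim_ definition above) =====
theorem whichone_spec : Claim_equal_whichone := by
  unfold Claim_equal_whichone Spec_whichone
  intro n _
  by_cases h : n ≤ 2
  · rw [whichone_alt, if_pos h]
    exact whichone_base n h
  · have h3 : 3 ≤ n := by omega
    rw [whichone_alt, if_neg h]
    exact main_loop n h3 n.toNat n le_rfl (by omega)
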